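-- pv_equiv track=rewrite | github.com/code-enig/Python | 32th/표현가능한이진트리.py | solution
-- ===== SOURCE A (Python) =====
-- def solution(numbers):
--     answer = []
--     for number in numbers:
--         b_num = format(number, 'b')
--         b_digit = len(str(b_num))
--         k = 0
--         while True:
--             if 2**k -1 >= b_digit:
--                 break
--             k += 1
--         str_b_num = ''.join(['0' for _ in range((2**k - (1+b_digit)))]) + str(b_num)
--         dummy = True if str_b_num[2**(k-1)-1] == '0' else False
--         answer.append(can_present(str_b_num,2**(k-1)-1,dummy)) # index는 0 부터 시작
--
--     return answer
--
-- def can_present(str_b_n,mid,dummy):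
--     if len(str_b_n) == 1:
--         if dummy and (str_b_n[mid] == '1'):
--             return 0
--         else :
--             return 1
--     if dummy and str_b_n[mid] =='1':
--         return 0
--     else:
--         nxt_dummy = True if str_b_n[mid] == '0' else False
--         return can_present(str_b_n[:mid],(mid-1)//2,nxt_dummy) and can_present(str_b_n[mid+1:],(mid-1)//2,nxt_dummy)
-- ===== SOURCE B (Python) =====
-- def lowbit(q):
--     # largest power of two dividing q (q >= 1)
--     return 1 if q % 2 == 1 else 2 * lowbit(q // 2)
--
--
-- def solution(numbers):
--     answer = []
--     for number in numbers:
--         bits = format(number, 'b')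
--         d = len(bits)
--         size = 1
--         while size < d:
--             size = 2 * size + 1
--         s = '0' * (size - d) + bits
--         # The padded string is the in-order traversal of a perfect binary tree.
--         # A node at index p sits at height t where 2^t = lowbit(p+1); its children
--         # are at p -/+ lowbit(p+1)//2.  The tree is representable iff no '0' node
--         # has a '1' child.
--         ok = 1
--         for p in range(len(s)):
--             low = lowbit(p + 1)
--             if low > 1 and s[p] == '0' and (s[p - low // 2] == '1' or s[p + low // 2] == '1'):
--                 ok = 0
--                 break
--         answer.append(ok)
--     return answer
-- ===== Notes on version B (the rewrite author's own statement) =====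
-- stated objective: simpler
-- what changed: Replaces A's divide-and-conquer recursion with dummy-flag propagation over string halves by a single flat scan of the in-order indices, using the local rule 'a 0 node must not have a 1 child' with children located arithmetically via the lowest set bit of p+1.
import Mathlib
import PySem

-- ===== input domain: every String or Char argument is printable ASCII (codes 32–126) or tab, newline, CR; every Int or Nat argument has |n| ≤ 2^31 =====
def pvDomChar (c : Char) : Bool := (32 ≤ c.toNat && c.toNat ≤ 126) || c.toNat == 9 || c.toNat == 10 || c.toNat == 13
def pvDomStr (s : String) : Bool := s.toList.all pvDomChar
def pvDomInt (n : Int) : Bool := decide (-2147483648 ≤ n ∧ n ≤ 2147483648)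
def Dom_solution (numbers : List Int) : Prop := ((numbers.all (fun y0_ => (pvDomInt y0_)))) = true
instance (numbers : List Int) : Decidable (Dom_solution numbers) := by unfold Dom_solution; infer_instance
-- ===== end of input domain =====

-- B replaces A's half-splitting recursion with dummy-flag propagation by one flat
-- scan over the in-order node indices, locating children via the lowest set bit of
-- p+1 (objective: simpler; equal return value on every input).


-- ===== PORT A =====
-- binary digits of n, most significant first (empty for n = 0)
def natBitsGo (n : Nat) : List Char :=
  if n = 0 then [] else natBitsGo (n / 2) ++ [if n % 2 = 1 then '1' else '0']

-- format(number, 'b') as a list of characters (sign '-' then the digits of |n|)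
def formatB (n : Int) : List Char :=
  if n < 0 then '-' :: (if n.natAbs = 0 then ['0'] else natBitsGo n.natAbs)
  else if n.natAbs = 0 then ['0'] else natBitsGo n.natAbs

-- the `k = 0; while True: if 2**k-1 >= b_digit: break; k += 1` loop of A
def findK (d : Nat) (k : Nat) : Nat :=
  if 2 ^ k - 1 ≥ d then k else findK d (k + 1)
termination_by d - k
decreasing_by
  have := Nat.lt_two_pow_self (n := k); omega

-- can_present, transliterated: strings are lists of chars, s[:mid]/s[mid+1:] are
-- take/drop (mid is nonnegative whenever this branch runs on A's calls); the final
-- `else 0` is an unreachable totality guard (Python would raise IndexError there)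
def canPresent (l : List Char) (mid : Int) (dummy : Bool) : Int :=
  if l.length = 1 then
    if dummy && (PySem.List.pyGet? l mid == some '1') then 0 else 1
  else if dummy && (PySem.List.pyGet? l mid == some '1') then 0
  else if h : 0 ≤ mid ∧ mid < l.length then
    let nxtDummy := PySem.List.pyGet? l mid == some '0'
    let lr := canPresent (l.take mid.toNat) (PySem.Int.floordiv (mid - 1) 2) nxtDummy
    if lr = 0 then lr
    else canPresent (l.drop (mid.toNat + 1)) (PySem.Int.floordiv (mid - 1) 2) nxtDummy
  else 0
termination_by l.length
decreasing_by
  · simp only [List.length_take]; omega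
  · simp only [List.length_drop]; omega

def solution (numbers : List Int) : List Int :=
  numbers.map (fun number =>
    let bNum := formatB number
    let bDigit := bNum.length
    let k := findK bDigit 0
    let strBNum := List.replicate (2 ^ k - (1 + bDigit)) '0' ++ bNum
    let dummy := PySem.List.pyGet? strBNum (((2 ^ (k - 1) - 1 : Nat) : Int)) == some '0'
    canPresent strBNum (((2 ^ (k - 1) - 1 : Nat) : Int)) dummy)

-- ===== PORT B =====
-- Source B's `lowbit`: largest power of two dividing q; the `q = 0` branch is an
-- unreachable totality guard (the Python helper is only called with q ≥ 1)
def lowbitN (q : Nat) : Nat :=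
  if q % 2 = 1 then 1 else if q = 0 then 0 else 2 * lowbitN (q / 2)

-- the `size = 1; while size < d: size = 2*size + 1` loop of B
def padSize (d : Nat) (size : Nat) : Nat :=
  if size < d then padSize d (2 * size + 1) else size
termination_by d - size

-- the `for p in range(len(s))` scan with early exit; all three indices are in
-- range on B's calls, so `getD … ' '` agrees with Python's s[…]
def scanB (s : List Char) (p : Nat) : Int :=
  if p < s.length then
    let low := lowbitN (p + 1)
    if 1 < low ∧ s.getD p ' ' = '0' ∧ (s.getD (p - low / 2) ' ' = '1' ∨ s.getD (p + low / 2) ' ' = '1')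
    then 0
    else scanB s (p + 1)
  else 1
termination_by s.length - p

def solution_alt (numbers : List Int) : List Int :=
  numbers.map (fun number =>
    let bits := formatB number
    let d := bits.length
    let size := padSize d 1
    let s := List.replicate (size - d) '0' ++ bits
    scanB s 0)

-- ===== PRECONDITION & SPEC =====
def Spec_solution (numbers : List Int) (out : List Int) : Prop := out = solution_alt numbers
instance (numbers : List Int) (out : List Int) : Decidable (Spec_solution numbers out) := by unfold Spec_solution; infer_instance

-- ===== CLAIM (what is proved, stated in full; the proofs are below) =====
def Claim_equal_solution : Prop := ∀ (numbers : List Int), Dom_solution numbers → Spec_solution numbers (solution numbers)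

-- ===== LEMMAS AND PROOFS =====

lemma pow2_mod2 (k : Nat) : 2 ^ (k + 1) % 2 = 0 := by
  simp [Nat.pow_succ, Nat.mul_mod_left]

lemma lowbitN_two_pow (k : Nat) : lowbitN (2 ^ k) = 2 ^ k := by
  induction k with
  | zero => rw [lowbitN]; norm_num
  | succ k ih =>
    rw [lowbitN, if_neg (by have := pow2_mod2 k; omega),
        if_neg (by positivity)]
    have hdiv : 2 ^ (k + 1) / 2 = 2 ^ k := by
      have : 2 ^ (k + 1) = 2 * 2 ^ k := by ring
      omega
    rw [hdiv, ih]; ring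

lemma lowbitN_dvd (q : Nat) : lowbitN q ∣ q := by
  induction q using Nat.strong_induction_on with
  | _ q ih =>
    rw [lowbitN]
    split_ifs with h1 h2
    · exact one_dvd _
    · simp [h2]
    · obtain ⟨m, hm⟩ := ih (q / 2) (by omega)
      exact ⟨m, by rw [Nat.mul_assoc, ← hm]; omega⟩

lemma lowbitN_pow (q : Nat) (h : 1 ≤ q) : ∃ t, lowbitN q = 2 ^ t := by
  induction q using Nat.strong_induction_on with
  | _ q ih =>
    rw [lowbitN]
    split_ifs with h1 h2
    · exact ⟨0, rfl⟩
    · omega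
    · obtain ⟨t, ht⟩ := ih (q / 2) (by omega) (by omega)
      exact ⟨t + 1, by rw [ht]; ring⟩

lemma lowbitN_shift (j x : Nat) (h1 : 1 ≤ x) (h2 : x < 2 ^ j) :
    lowbitN (2 ^ j + x) = lowbitN x := by
  induction j generalizing x with
  | zero => simp at h2; omega
  | succ j ih =>
    by_cases hx : x % 2 = 1
    · have hm : (2 ^ (j+1) + x) % 2 = 1 := by have := pow2_mod2 j; omega
      rw [lowbitN, if_pos hm, lowbitN, if_pos hx]
    · have hx2 : 2 ≤ x := by omega
      have hmod : (2 ^ (j+1) + x) % 2 = 0 := by have := pow2_mod2 j; omega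
      have hp : 0 < 2 ^ (j+1) := by positivity
      rw [lowbitN, if_neg (by omega), if_neg (by omega)]
      conv_rhs => rw [lowbitN, if_neg hx, if_neg (by omega)]
      have hdiv : (2 ^ (j+1) + x) / 2 = 2 ^ j + x / 2 := by
        have : 2 ^ (j+1) = 2 * 2 ^ j := by ring
        omega
      have h3 : 2 ^ (j+1) = 2 * 2 ^ j := by ring
      rw [hdiv, ih (x / 2) (by omega) (by omega)]

-- child-index bounds for an internal node p of a 2^k-1 string
lemma bad_child_lt (k p : Nat) (hp : p < 2 ^ k - 1) (hl : 1 < lowbitN (p + 1)) :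
    lowbitN (p + 1) / 2 ≤ p ∧ p + lowbitN (p + 1) / 2 < 2 ^ k - 1 := by
  obtain ⟨t, ht⟩ := lowbitN_pow (p + 1) (by omega)
  have hdvd := lowbitN_dvd (p + 1)
  have ht1 : 1 ≤ t := by
    rcases Nat.eq_zero_or_pos t with h | h
    · rw [h] at ht; omega
    · exact h
  have hle : 2 ^ t ≤ p + 1 := ht ▸ Nat.le_of_dvd (by omega) hdvd
  have htk : t < k := by
    by_contra hcon
    have : 2 ^ k ≤ 2 ^ t := Nat.pow_le_pow_right (by norm_num) (by omega)
    have h1 : 0 < 2 ^ k := by positivity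
    omega
  -- p + 1 ≤ 2^k - 2^t  since 2^t ∣ p+1 and p+1 < 2^k
  obtain ⟨m, hm⟩ := ht ▸ hdvd
  have h2k : 2 ^ k = 2 ^ t * 2 ^ (k - t) := by
    rw [← Nat.pow_add]; congr 1; omega
  have hmlt : m < 2 ^ (k - t) := by
    by_contra hcon
    have : 2 ^ t * 2 ^ (k - t) ≤ 2 ^ t * m := Nat.mul_le_mul_left _ (by omega)
    omega
  have hple : p + 1 ≤ 2 ^ k - 2 ^ t := by
    have : 2 ^ t * m ≤ 2 ^ t * (2 ^ (k - t) - 1) := Nat.mul_le_mul_left _ (by omega)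
    have h3 : 2 ^ t * (2 ^ (k - t) - 1) = 2 ^ k - 2 ^ t := by
      rw [Nat.mul_sub, h2k]; omega
    omega
  have hhalf : 2 ^ t / 2 = 2 ^ (t - 1) := by
    conv_lhs => rw [show t = (t - 1) + 1 by omega]
    rw [Nat.pow_succ]; omega
  have hts : 2 ^ t = 2 * 2 ^ (t - 1) := by
    conv_lhs => rw [show t = (t - 1) + 1 by omega]
    rw [Nat.pow_succ]; omega
  have h1 : 0 < 2 ^ (t - 1) := by positivity
  rw [ht, hhalf]
  omega

-- the violation test B performs at index p
abbrev isBad (s : List Char) (p : Nat) : Prop :=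
  1 < lowbitN (p + 1) ∧ s.getD p ' ' = '0' ∧
    (s.getD (p - lowbitN (p + 1) / 2) ' ' = '1' ∨ s.getD (p + lowbitN (p + 1) / 2) ' ' = '1')

lemma getD_append_left (a b : List Char) (c : Char) (i : Nat) (h : i < a.length) :
    (a ++ c :: b).getD i ' ' = a.getD i ' ' := by
  simp [List.getD, List.getElem?_append_left h]

lemma getD_append_mid (a b : List Char) (c : Char) :
    (a ++ c :: b).getD a.length ' ' = c := by
  simp [List.getD]

lemma getD_append_right (a b : List Char) (c : Char) (j : Nat) :
    (a ++ c :: b).getD (a.length + 1 + j) ' ' = b.getD j ' ' := by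
  simp only [List.getD, List.getElem?_append_right (show a.length ≤ a.length + 1 + j by omega)]
  have h : a.length + 1 + j - a.length = j + 1 := by omega
  rw [h]
  simp

lemma isBad_left (k : Nat) (a b : List Char) (c : Char) (ha : a.length = 2 ^ k - 1)
    (p : Nat) (hp : p < 2 ^ k - 1) : isBad (a ++ c :: b) p ↔ isBad a p := by
  by_cases hl : 1 < lowbitN (p + 1)
  · obtain ⟨h1, h2⟩ := bad_child_lt k p hp hl
    rw [isBad, isBad,
        getD_append_left a b c p (by omega),
        getD_append_left a b c (p - lowbitN (p + 1) / 2) (by omega),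
        getD_append_left a b c (p + lowbitN (p + 1) / 2) (by omega)]
  · simp [isBad, hl]

lemma isBad_mid (k : Nat) (hk : 1 ≤ k) (a b : List Char) (c : Char)
    (ha : a.length = 2 ^ k - 1) :
    isBad (a ++ c :: b) (2 ^ k - 1) ↔
      (c = '0' ∧ (a.getD (2 ^ (k-1) - 1) ' ' = '1' ∨ b.getD (2 ^ (k-1) - 1) ' ' = '1')) := by
  have hpos : 0 < 2 ^ k := by positivity
  have hks : 2 ^ k = 2 * 2 ^ (k - 1) := by
    conv_lhs => rw [show k = (k - 1) + 1 by omega]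
    rw [Nat.pow_succ]; ring
  have hpos' : 0 < 2 ^ (k - 1) := by positivity
  have hsucc : 2 ^ k - 1 + 1 = 2 ^ k := by omega
  have hlow : lowbitN (2 ^ k - 1 + 1) = 2 ^ k := by rw [hsucc]; exact lowbitN_two_pow k
  have hhalf : 2 ^ k / 2 = 2 ^ (k - 1) := by omega
  rw [isBad, hlow, hhalf]
  have hi1 : 2 ^ k - 1 - 2 ^ (k - 1) = 2 ^ (k - 1) - 1 := by omega
  have hi2 : 2 ^ k - 1 + 2 ^ (k - 1) = a.length + 1 + (2 ^ (k - 1) - 1) := by omega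
  have hm : (a ++ c :: b).getD (2 ^ k - 1) ' ' = c := by
    rw [show 2 ^ k - 1 = a.length by omega, getD_append_mid]
  rw [hi1, hi2, getD_append_right, hm,
      getD_append_left a b c (2 ^ (k - 1) - 1) (by omega)]
  constructor
  · rintro ⟨_, h2, h3⟩; exact ⟨h2, h3⟩
  · rintro ⟨h2, h3⟩; exact ⟨by omega, h2, h3⟩


lemma isBad_right (k : Nat) (a b : List Char) (c : Char) (ha : a.length = 2 ^ k - 1)
    (p' : Nat) (hp : p' < 2 ^ k - 1) :
    isBad (a ++ c :: b) (2 ^ k + p') ↔ isBad b p' := by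
  have hpos : 0 < 2 ^ k := by positivity
  have hlow : lowbitN (2 ^ k + p' + 1) = lowbitN (p' + 1) := by
    rw [show 2 ^ k + p' + 1 = 2 ^ k + (p' + 1) by omega]
    exact lowbitN_shift k (p' + 1) (by omega) (by omega)
  by_cases hl : 1 < lowbitN (p' + 1)
  · obtain ⟨h1, h2⟩ := bad_child_lt k p' hp hl
    have e0 : 2 ^ k + p' = a.length + 1 + p' := by omega
    have e1 : 2 ^ k + p' - lowbitN (p' + 1) / 2 = a.length + 1 + (p' - lowbitN (p' + 1) / 2) := by omega
    have e2 : 2 ^ k + p' + lowbitN (p' + 1) / 2 = a.length + 1 + (p' + lowbitN (p' + 1) / 2) := by omega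
    rw [isBad, isBad, hlow, e1, e2, getD_append_right, getD_append_right]
    conv_lhs => rw [e0, getD_append_right]
  · simp [isBad, hlow, hl]

lemma exists_bad_split (k : Nat) (hk : 1 ≤ k) (a b : List Char) (c : Char)
    (ha : a.length = 2 ^ k - 1) (hb : b.length = 2 ^ k - 1) :
    (∃ p, p < (a ++ c :: b).length ∧ isBad (a ++ c :: b) p) ↔
      ((∃ p, p < a.length ∧ isBad a p) ∨ (∃ p, p < b.length ∧ isBad b p) ∨
        (c = '0' ∧ (a.getD (2 ^ (k-1) - 1) ' ' = '1' ∨ b.getD (2 ^ (k-1) - 1) ' ' = '1'))) := by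
  have hpos : 0 < 2 ^ k := by positivity
  have hlen : (a ++ c :: b).length = 2 ^ k - 1 + 1 + (2 ^ k - 1) := by
    simp [ha, hb]; omega
  constructor
  · rintro ⟨p, hplen, hbad⟩
    rcases Nat.lt_trichotomy p (2 ^ k - 1) with h | h | h
    · exact Or.inl ⟨p, by omega, (isBad_left k a b c ha p h).mp hbad⟩
    · exact Or.inr (Or.inr ((isBad_mid k hk a b c ha).mp (h ▸ hbad)))
    · refine Or.inr (Or.inl ⟨p - 2 ^ k, by omega, ?_⟩)
      have he : p = 2 ^ k + (p - 2 ^ k) := by omega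
      exact (isBad_right k a b c ha (p - 2 ^ k) (by omega)).mp (he ▸ hbad)
  · rintro (⟨p, hp, hbad⟩ | ⟨p, hp, hbad⟩ | h)
    · exact ⟨p, by omega, (isBad_left k a b c ha p (by omega)).mpr hbad⟩
    · exact ⟨2 ^ k + p, by omega, (isBad_right k a b c ha p (by omega)).mpr hbad⟩
    · exact ⟨2 ^ k - 1, by omega, (isBad_mid k hk a b c ha).mpr h⟩

lemma scanB_char (s : List Char) (p : Nat) :
    scanB s p = if ∃ q, q < s.length ∧ (p ≤ q ∧ isBad s q) then 0 else 1 := by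
  fun_induction scanB s p with
  | case1 p hlen low hbad =>
    rw [if_pos ⟨p, hlen, Nat.le_refl p, hbad⟩]
  | case2 p hlen low hbad ih =>
    have hbad' : ¬ isBad s p := by
      intro hc
      rw [isBad] at hc
      exact hbad hc
    rw [ih]
    congr 1
    simp only [eq_iff_iff]
    constructor
    · rintro ⟨q, h1, h2, h3⟩
      exact ⟨q, h1, by omega, h3⟩
    · rintro ⟨q, h1, h2, h3⟩
      refine ⟨q, h1, ?_, h3⟩
      rcases Nat.eq_or_lt_of_le h2 with h | h
      · exact absurd (h ▸ h3) hbad'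
      · omega
  | case3 p hlen =>
    rw [if_neg]
    rintro ⟨q, h1, h2, _⟩; omega

lemma canPresent_split (k : Nat) (hk : 1 ≤ k) (a b : List Char) (c : Char)
    (ha : a.length = 2 ^ k - 1) (hb : b.length = 2 ^ k - 1) (d : Bool)
    (iha : ∀ d', canPresent a ((2 ^ (k - 1) - 1 : Nat) : Int) d' =
      if (d' = true ∧ a.getD (2 ^ (k - 1) - 1) ' ' = '1') ∨ (∃ p, p < a.length ∧ isBad a p)
      then 0 else 1)
    (ihb : ∀ d', canPresent b ((2 ^ (k - 1) - 1 : Nat) : Int) d' =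
      if (d' = true ∧ b.getD (2 ^ (k - 1) - 1) ' ' = '1') ∨ (∃ p, p < b.length ∧ isBad b p)
      then 0 else 1) :
    canPresent (a ++ c :: b) ((2 ^ (k + 1 - 1) - 1 : Nat) : Int) d =
      if (d = true ∧ (a ++ c :: b).getD (2 ^ (k + 1 - 1) - 1) ' ' = '1') ∨
          (∃ p, p < (a ++ c :: b).length ∧ isBad (a ++ c :: b) p)
      then 0 else 1 := by
  have hkk : k + 1 - 1 = k := by omega
  rw [hkk]
  have hpos : 0 < 2 ^ (k - 1) := by positivity
  have hks : 2 ^ k = 2 * 2 ^ (k - 1) := by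
    conv_lhs => rw [show k = (k - 1) + 1 by omega]
    rw [Nat.pow_succ]; ring
  have hks1 : 2 ^ (k + 1) = 2 * 2 ^ k := by ring
  have hlen : (a ++ c :: b).length = 2 ^ (k + 1) - 1 := by
    simp only [List.length_append, List.length_cons, ha, hb]
    omega
  have hma : (2 ^ k - 1 : Nat) = a.length := ha.symm
  have hg : PySem.List.pyGet? (a ++ c :: b) ((2 ^ k - 1 : Nat) : Int) = some c := by
    rw [hma]
    exact PySem.List.pyGet?_append_length a b c
  have hgd : (a ++ c :: b).getD (2 ^ k - 1) ' ' = c := by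
    rw [hma]; exact getD_append_mid a b c
  have hsplit := exists_bad_split k hk a b c ha hb
  have htoNat : ((2 ^ k - 1 : Nat) : Int).toNat = a.length := by
    rw [hma]; exact Int.toNat_natCast _
  have hfd : PySem.Int.floordiv (((2 ^ k - 1 : Nat) : Int) - 1) 2
      = ((2 ^ (k - 1) - 1 : Nat) : Int) := by
    have h2k : 2 ≤ 2 ^ k := by
      calc 2 = 2 ^ 1 := by norm_num
        _ ≤ 2 ^ k := Nat.pow_le_pow_right (by norm_num) hk
    have h1 : (((2 ^ k - 1 : Nat) : Int) - 1) = ((2 ^ k - 2 : Nat) : Int) := by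
      rw [Nat.cast_sub (by omega), Nat.cast_sub (by omega)]
      push_cast
      ring
    have h2 : PySem.Int.floordiv (((2 ^ k - 2 : Nat) : Int)) (((2 : Nat) : Int))
        = (((2 ^ k - 2) / 2 : Nat) : Int) := PySem.Int.floordiv_natCast _ _
    have h3 : (2 ^ k - 2) / 2 = 2 ^ (k - 1) - 1 := by omega
    rw [h1]
    exact_mod_cast h3 ▸ h2
  have htake : (a ++ c :: b).take a.length = a := List.take_left ..
  have hdrop : (a ++ c :: b).drop (a.length + 1) = b := by
    have h1 : a ++ c :: b = (a ++ [c]) ++ b := by simp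
    have h2 : a.length + 1 = (a ++ [c]).length := by simp
    rw [h1, h2, List.drop_left]
  rw [canPresent]
  rw [if_neg (show ¬ ((a ++ c :: b).length = 1) by clear htoNat hfd; rw [hlen]; omega)]
  by_cases hdc : d = true ∧ c = '1'
  · rw [if_pos (by rw [hg]; simp [hdc.1, hdc.2]),
        if_pos (Or.inl ⟨hdc.1, by rw [hgd]; exact hdc.2⟩)]
  · rw [if_neg (by
        rw [hg]
        simp only [Bool.and_eq_true, beq_iff_eq, Option.some.injEq]
        intro hcon
        exact hdc ⟨hcon.1, hcon.2⟩)]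
    rw [dif_pos (show (0 : Int) ≤ ((2 ^ k - 1 : Nat) : Int) ∧ ((2 ^ k - 1 : Nat) : Int) < (a ++ c :: b).length by
        refine ⟨by positivity, ?_⟩
        rw [hlen]
        have h3 : (2 ^ k - 1 : Nat) < 2 ^ (k + 1) - 1 := by clear htoNat hfd; omega
        exact_mod_cast h3)]
    simp only [hg, htoNat, hfd, Option.some_beq_some]
    rw [htake, hdrop]
    rw [iha, ihb]
    have hP1P2 :
        ((d = true ∧ (a ++ c :: b).getD (2 ^ k - 1) ' ' = '1') ∨
            (∃ p, p < (a ++ c :: b).length ∧ isBad (a ++ c :: b) p)) ↔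
          ((((c == '0') = true) ∧ a.getD (2 ^ (k - 1) - 1) ' ' = '1' ∨ (∃ p, p < a.length ∧ isBad a p)) ∨
           (((c == '0') = true) ∧ b.getD (2 ^ (k - 1) - 1) ' ' = '1' ∨ (∃ p, p < b.length ∧ isBad b p))) := by
      rw [hgd, hsplit]
      simp only [beq_iff_eq]
      constructor
      · rintro (⟨h1, h2⟩ | hA | hB | ⟨h1, h2 | h2⟩)
        · exact absurd ⟨h1, h2⟩ hdc
        · exact Or.inl (Or.inr hA)
        · exact Or.inr (Or.inr hB)
        · exact Or.inl (Or.inl ⟨h1, h2⟩)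
        · exact Or.inr (Or.inl ⟨h1, h2⟩)
      · rintro ((⟨h1, h2⟩ | hA) | (⟨h1, h2⟩ | hB))
        · exact Or.inr (Or.inr (Or.inr ⟨h1, Or.inl h2⟩))
        · exact Or.inr (Or.inl hA)
        · exact Or.inr (Or.inr (Or.inr ⟨h1, Or.inr h2⟩))
        · exact Or.inr (Or.inr (Or.inl hB))
    by_cases hP1 : (((c == '0') = true) ∧ a.getD (2 ^ (k - 1) - 1) ' ' = '1' ∨ (∃ p, p < a.length ∧ isBad a p))
    · rw [if_pos hP1, if_pos (show (0 : Int) = 0 from rfl), if_pos (hP1P2.mpr (Or.inl hP1))]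
    · rw [if_neg hP1, if_neg (show ¬ (1 : Int) = 0 by norm_num)]
      by_cases hP2 : (((c == '0') = true) ∧ b.getD (2 ^ (k - 1) - 1) ' ' = '1' ∨ (∃ p, p < b.length ∧ isBad b p))
      · rw [if_pos hP2, if_pos (hP1P2.mpr (Or.inr hP2))]
      · rw [if_neg hP2, if_neg (fun hc => (hP1P2.mp hc).elim hP1 hP2)]

lemma canPresent_char (k : Nat) (hk : 1 ≤ k) (s : List Char) (hs : s.length = 2 ^ k - 1) (d : Bool) :
    canPresent s (((2 ^ (k - 1) - 1 : Nat) : Int)) d =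
      if (d = true ∧ s.getD (2 ^ (k - 1) - 1) ' ' = '1') ∨ (∃ p, p < s.length ∧ isBad s p)
      then 0 else 1 := by
  induction k, hk using Nat.le_induction generalizing s d with
  | base =>
    have hs1 : s.length = 1 := by simpa using hs
    obtain ⟨x, rfl⟩ := List.length_eq_one_iff.mp hs1
    have hnb : ∀ p, p < 1 → ¬ isBad [x] p := by
      intro p hp
      interval_cases p
      rw [isBad, lowbitN]
      norm_num
    have hex : ¬ (∃ p, p < [x].length ∧ isBad [x] p) := by
      rintro ⟨p, hp, hb⟩
      exact hnb p (by simpa using hp) hb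
    have hcp : canPresent [x] ((2 ^ (1 - 1) - 1 : Nat) : Int) d = if d = true ∧ x = '1' then 0 else 1 := by
      rw [canPresent, if_pos (by simp)]
      by_cases hd : d <;> by_cases hx : x = '1' <;> simp [hd, hx]
    rw [hcp]
    by_cases hc : d = true ∧ x = '1'
    · rw [if_pos hc, if_pos (Or.inl ⟨hc.1, by simpa [List.getD] using hc.2⟩)]
    · rw [if_neg hc, if_neg]
      rintro (⟨h1, h2⟩ | hex')
      · exact hc ⟨h1, by simpa [List.getD] using h2⟩
      · exact hex hex'
  | succ k hk1 ih =>
    have hpos : 0 < 2 ^ k := by positivity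
    have hks1 : 2 ^ (k + 1) = 2 * 2 ^ k := by ring
    have hmlt : 2 ^ k - 1 < s.length := by omega
    obtain ⟨a, b, c, hC, ha, hb⟩ :
        ∃ a b c, s = a ++ c :: b ∧ a.length = 2 ^ k - 1 ∧ b.length = 2 ^ k - 1 := by
      refine ⟨s.take (2 ^ k - 1), s.drop (2 ^ k - 1 + 1), s[2 ^ k - 1], ?_, ?_, ?_⟩
      · conv_lhs => rw [← List.take_append_drop (2 ^ k - 1) s]
        rw [List.drop_eq_getElem_cons hmlt]
      · rw [List.length_take]; omega
      · rw [List.length_drop]; omega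
    subst hC
    exact canPresent_split k hk1 a b c ha hb d (fun d' => ih a ha d') (fun d' => ih b hb d')

lemma findK_ge (d k : Nat) : d ≤ 2 ^ (findK d k) - 1 := by
  fun_induction findK d k with
  | case1 k h => exact h
  | case2 k h ih => exact ih

lemma findK_le (d k : Nat) : k ≤ findK d k := by
  fun_induction findK d k with
  | case1 k h => exact Nat.le_refl k
  | case2 k h ih => omega

lemma findK_pos (d : Nat) (hd : 1 ≤ d) : 1 ≤ findK d 0 := by
  rw [findK, if_neg (by norm_num; omega)]
  exact findK_le d 1

lemma padSize_findK (d k : Nat) : padSize d (2 ^ k - 1) = 2 ^ (findK d k) - 1 := by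
  fun_induction findK d k with
  | case1 k h => rw [padSize, if_neg (by omega)]
  | case2 k h ih =>
    rw [padSize, if_pos (by omega)]
    have harg : 2 * (2 ^ k - 1) + 1 = 2 ^ (k + 1) - 1 := by
      have : 2 ^ (k + 1) = 2 * 2 ^ k := by ring
      have : 0 < 2 ^ k := by positivity
      omega
    rw [harg, ih]

lemma padSize_one (d : Nat) (hd : 1 ≤ d) : padSize d 1 = 2 ^ (findK d 0) - 1 := by
  have h0 : findK d 0 = findK d 1 := by rw [findK, if_neg (by norm_num; omega)]
  have h2 := padSize_findK d 1
  norm_num at h2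
  rw [h0, h2]

lemma natBitsGo_ne_nil (q : Nat) (hq : q ≠ 0) : natBitsGo q ≠ [] := by
  rw [natBitsGo, if_neg hq]
  simp

lemma formatB_len (n : Int) : 1 ≤ (formatB n).length := by
  by_cases h1 : n < 0
  · rw [formatB, if_pos h1]; simp
  · rw [formatB, if_neg h1]
    by_cases h2 : n.natAbs = 0
    · rw [if_pos h2]; simp
    · rw [if_neg h2]
      exact List.length_pos_iff.mpr (natBitsGo_ne_nil _ h2)

lemma main_eq (numbers : List Int) : solution numbers = solution_alt numbers := by
  simp only [solution, solution_alt]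
  apply List.map_congr_left
  intro n _
  have hd : 1 ≤ (formatB n).length := formatB_len n
  set dg := (formatB n).length with hdg
  set k := findK dg 0 with hk
  have hk1 : 1 ≤ k := findK_pos dg hd
  have hge : dg ≤ 2 ^ k - 1 := findK_ge dg 0
  have hpad : padSize dg 1 = 2 ^ k - 1 := padSize_one dg hd
  have hks : 2 ^ k = 2 * 2 ^ (k - 1) := by
    conv_lhs => rw [show k = (k - 1) + 1 by omega]
    rw [Nat.pow_succ]; ring
  have hpos : 0 < 2 ^ (k - 1) := by positivity
  have hrep : 2 ^ k - (1 + dg) = 2 ^ k - 1 - dg := by omega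
  rw [hpad, hrep]
  set s := List.replicate (2 ^ k - 1 - dg) '0' ++ formatB n with hsdef
  have hslen : s.length = 2 ^ k - 1 := by
    rw [hsdef, List.length_append, List.length_replicate]
    omega
  have hidx : 2 ^ (k - 1) - 1 < s.length := by omega
  have hg : PySem.List.pyGet? s (((2 ^ (k - 1) - 1 : Nat) : Int)) = some (s.getD (2 ^ (k - 1) - 1) ' ') := by
    rw [PySem.List.pyGet?_natCast, List.getElem?_eq_getElem hidx, List.getD_eq_getElem s ' ' hidx]
  rw [canPresent_char k hk1 s hslen _, scanB_char s 0]
  have hnd : ¬ ((PySem.List.pyGet? s (((2 ^ (k - 1) - 1 : Nat) : Int)) == some '0') = true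
      ∧ s.getD (2 ^ (k - 1) - 1) ' ' = '1') := by
    rw [hg]
    rintro ⟨h1, h2⟩
    rw [h2] at h1
    simp at h1
  refine if_congr ?_ rfl rfl
  constructor
  · rintro (h | ⟨q, h1, h2⟩)
    · exact absurd h hnd
    · exact ⟨q, h1, Nat.zero_le q, h2⟩
  · rintro ⟨q, h1, _, h2⟩
    exact Or.inr ⟨q, h1, h2⟩

-- ===== VERDICT (by name: the statement is the Claim_ definition above) =====
theorem solution_spec : Claim_equal_solution := by
  intro numbers _
  unfold Spec_solution
  exact main_eq numbers
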